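-- pv_equiv track=rewrite | github.com/NUSTM/COQE | Baseline_Systems/quintuple_generate_utils/pair_representation_generator.py | create_pair_label
-- ===== SOURCE A (Python) =====
-- def is_equal_tuple_pair(candidate_tuple_col, truth_tuple_col, null_pair):
--     if truth_tuple_col == null_pair:
--         return False
--
--     if len(candidate_tuple_col) != len(truth_tuple_col):
--         if candidate_tuple_col == truth_tuple_col[:-1]:
--             return True
--         return False
--     else:
--         if candidate_tuple_col == truth_tuple_col:
--             return True
--         return False
--
-- def create_pair_label(candidate_col, truth_pair_label):
--     """
--     :param candidate_col: shape is [n, tuple_pair_num, tuple_pair]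
--     :param truth_pair_label: shape is [n, tuple_pair_num, tuple_pair]
--     :return:
--     """
--     pair_label_col, null_pair = [], [(-1, -1)] * 5
--     for i in range(len(candidate_col)):
--         # cartesian product pair num
--         is_pair_label = []
--         for j in range(len(candidate_col[i])):
--             # truth predicate pair num
--             isExist = False
--             for k in range(len(truth_pair_label[i])):
--                 if is_equal_tuple_pair(candidate_col[i][j], truth_pair_label[i][k], null_pair):
--                     isExist = True
--
--             is_pair_label.append(1 if isExist else 0)
--
--         pair_label_col.append(is_pair_label)
--
--     return pair_label_col
-- ===== SOURCE B (Python) =====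
-- def create_pair_label(candidate_col, truth_pair_label):
--     """Per row, build the set of truth keys (each non-null truth tuple and its
--     last-element-dropped form) once, then label each candidate by membership."""
--     null_pair = [(-1, -1)] * 5
--     pair_label_col = []
--     for i, cands in enumerate(candidate_col):
--         if not cands:
--             pair_label_col.append([])
--             continue
--         keys = set()
--         for t in truth_pair_label[i]:
--             if t != null_pair:
--                 tt = tuple(t)
--                 keys.add(tt)
--                 keys.add(tt[:-1])
--         pair_label_col.append([1 if tuple(c) in keys else 0 for c in cands])
--     return pair_label_col
-- ===== Notes on version B (the rewrite author's own statement) =====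
-- stated objective: faster
-- what changed: Instead of scanning the whole truth row inside every candidate (triple nested loop with a flag), B builds per row a hash set containing each non-null truth tuple and its last-element-dropped form, then labels each candidate by a single set-membership test.
import Mathlib
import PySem

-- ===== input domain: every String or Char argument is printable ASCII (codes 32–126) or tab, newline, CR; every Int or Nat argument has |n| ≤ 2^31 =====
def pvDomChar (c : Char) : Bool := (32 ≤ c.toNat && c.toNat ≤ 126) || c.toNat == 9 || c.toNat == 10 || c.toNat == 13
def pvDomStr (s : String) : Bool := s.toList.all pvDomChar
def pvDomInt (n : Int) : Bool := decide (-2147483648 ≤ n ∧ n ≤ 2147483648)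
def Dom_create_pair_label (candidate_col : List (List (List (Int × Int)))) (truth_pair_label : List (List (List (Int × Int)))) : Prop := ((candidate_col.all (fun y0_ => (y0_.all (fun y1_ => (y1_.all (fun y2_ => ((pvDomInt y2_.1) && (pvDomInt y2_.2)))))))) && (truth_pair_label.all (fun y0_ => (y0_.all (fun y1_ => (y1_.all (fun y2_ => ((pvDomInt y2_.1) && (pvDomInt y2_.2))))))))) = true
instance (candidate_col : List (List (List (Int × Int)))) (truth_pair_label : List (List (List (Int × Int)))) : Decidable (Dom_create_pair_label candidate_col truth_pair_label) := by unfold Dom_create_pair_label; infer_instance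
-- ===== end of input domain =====

-- B replaces A's triple nested scan-with-flag by a per-row set of truth keys and one
-- membership test per candidate (objective: faster, O(c+t) per row instead of O(c*t)).

-- ===== PORT A =====
-- t[:-1] on a Python list of pairs is exactly List.dropLast
def is_equal_tuple_pair (candidate_tuple_col : List (Int × Int)) (truth_tuple_col : List (Int × Int)) (null_pair : List (Int × Int)) : Bool :=
  if truth_tuple_col == null_pair then false
  else if candidate_tuple_col.length != truth_tuple_col.length then
    candidate_tuple_col == truth_tuple_col.dropLast
  else
    candidate_tuple_col == truth_tuple_col

def create_pair_label (candidate_col : List (List (List (Int × Int)))) (truth_pair_label : List (List (List (Int × Int)))) : List (List Int) :=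
  let null_pair : List (Int × Int) := List.replicate 5 (-1, -1)
  (List.range candidate_col.length).map (fun i =>
    let ci := candidate_col.getD i []
    (List.range ci.length).map (fun j =>
      let c := ci.getD j []
      let isExist := (truth_pair_label.getD i []).foldl
        (fun b t => if is_equal_tuple_pair c t null_pair then true else b) false
      if isExist then (1 : Int) else 0))

-- ===== PORT B =====
def create_pair_label_alt (candidate_col : List (List (List (Int × Int)))) (truth_pair_label : List (List (List (Int × Int)))) : List (List Int) :=
  let null_pair : List (Int × Int) := List.replicate 5 (-1, -1)
  (PySem.List.enumerate candidate_col).map (fun ic =>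
    if ic.2.isEmpty then ([] : List Int)
    else
      let keys : PySem.Set (List (Int × Int)) :=
        (PySem.List.pyGetD truth_pair_label ic.1 []).foldl
          (fun s t => if t != null_pair then PySem.Set.add (PySem.Set.add s t) t.dropLast else s)
          PySem.Set.empty
      ic.2.map (fun c => if PySem.Set.contains keys c then (1 : Int) else 0))

-- ===== PRECONDITION & SPEC =====
-- Pre_ excludes exactly the inputs on which Python A raises IndexError: a row index i with a
-- nonempty candidate row but no corresponding truth row (B raises identically there).
def Pre_create_pair_label (candidate_col : List (List (List (Int × Int)))) (truth_pair_label : List (List (List (Int × Int)))) : Prop :=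
  ∀ i ∈ List.range candidate_col.length, candidate_col.getD i [] ≠ [] → i < truth_pair_label.length
instance (candidate_col : List (List (List (Int × Int)))) (truth_pair_label : List (List (List (Int × Int)))) : Decidable (Pre_create_pair_label candidate_col truth_pair_label) := by unfold Pre_create_pair_label; infer_instance

def pvWitness_create_pair_label : (List (List (List (Int × Int)))) × (List (List (List (Int × Int)))) :=
  ([[[(1, 2)], [(3, 4), (5, 6)]]], [[[(1, 2), (7, 8)]]])

def Spec_create_pair_label (candidate_col : List (List (List (Int × Int)))) (truth_pair_label : List (List (List (Int × Int)))) (out : List (List Int)) : Prop := out = create_pair_label_alt candidate_col truth_pair_label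
instance (candidate_col : List (List (List (Int × Int)))) (truth_pair_label : List (List (List (Int × Int)))) (out : List (List Int)) : Decidable (Spec_create_pair_label candidate_col truth_pair_label out) := by unfold Spec_create_pair_label; infer_instance

-- ===== CLAIM (what is proved, stated in full; the proofs are below) =====
def Claim_equal_create_pair_label : Prop := ∀ (candidate_col : List (List (List (Int × Int)))) (truth_pair_label : List (List (List (Int × Int)))), Dom_create_pair_label candidate_col truth_pair_label → Pre_create_pair_label candidate_col truth_pair_label → Spec_create_pair_label candidate_col truth_pair_label (create_pair_label candidate_col truth_pair_label)

-- ===== LEMMAS AND PROOFS =====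

-- A's match test, rewritten as "non-null and (equal or equal to dropLast)".
lemma eqPair_eq (c t null : List (Int × Int)) :
    is_equal_tuple_pair c t null = (!(t == null) && (c == t || c == t.dropLast)) := by
  unfold is_equal_tuple_pair
  by_cases ht : t = null
  · simp [ht]
  · by_cases hl : c.length = t.length
    · have hdrop : (c == t.dropLast) = true → (c == t) = true := by
        intro h
        have hc : c = t.dropLast := by simpa using h
        have : t.length - 1 = t.length := by
          rw [← List.length_dropLast, ← hc, hl]
        have ht0 : t.length = 0 := by omega
        have : t = [] := List.eq_nil_of_length_eq_zero ht0
        simp [this] at hc; simp [hc, this]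
      by_cases hc : c = t
      · simp [ht, hc]
      · have : (c == t.dropLast) = false := by
          cases h : (c == t.dropLast) with
          | true => exact absurd (by simpa using hdrop h) hc
          | false => rfl
        simp [ht, hl, hc, this]
    · have hct : c ≠ t := fun h => hl (by rw [h])
      have h1 : (t == null) = false := by simpa using ht
      have h2 : (c == t) = false := by simpa using hct
      rw [h1, h2]
      simp
      exact fun _ => hl

-- A's inner flag loop is List.any.
lemma foldl_flag (p : List (Int × Int) → Bool) (ts : List (List (Int × Int))) (b : Bool) :
    ts.foldl (fun b t => if p t then true else b) b = (b || ts.any p) := by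
  induction ts generalizing b with
  | nil => simp
  | cons t ts ih =>
    simp only [List.foldl_cons, List.any_cons, ih]
    by_cases h : p t <;> simp [h]

-- Membership in B's per-row key set.
lemma mem_keysFold (null : List (Int × Int)) (ts : List (List (Int × Int)))
    (s : PySem.Set (List (Int × Int))) (c : List (Int × Int)) :
    c ∈ ts.foldl (fun s t => if t != null then PySem.Set.add (PySem.Set.add s t) t.dropLast else s) s ↔
      c ∈ s ∨ ∃ t ∈ ts, t ≠ null ∧ (c = t ∨ c = t.dropLast) := by
  induction ts generalizing s with
  | nil => simp
  | cons t ts ih =>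
    simp only [List.foldl_cons]
    by_cases h : t = null
    · have hb : (t != null) = false := by simpa using h
      rw [hb]
      simp only [ih, List.mem_cons]
      subst h
      constructor
      · rintro (hs | ⟨u, hu, hn, he⟩)
        · exact Or.inl hs
        · exact Or.inr ⟨u, Or.inr hu, hn, he⟩
      · rintro (hs | ⟨u, (hu | hu), hn, he⟩)
        · exact Or.inl hs
        · exact absurd hu hn
        · exact Or.inr ⟨u, hu, hn, he⟩
    · have hb : (t != null) = true := by simpa using h
      rw [hb]
      simp only [if_true, ih, PySem.Set.mem_add, List.mem_cons]
      constructor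
      · rintro (((hs | he) | he) | ⟨u, hu, hn, he⟩)
        · exact Or.inl hs
        · exact Or.inr ⟨t, Or.inl rfl, h, Or.inl he⟩
        · exact Or.inr ⟨t, Or.inl rfl, h, Or.inr he⟩
        · exact Or.inr ⟨u, Or.inr hu, hn, he⟩
      · rintro (hs | ⟨u, (hu | hu), hn, (he | he)⟩)
        · exact Or.inl (Or.inl (Or.inl hs))
        · exact Or.inl (Or.inl (Or.inr (hu ▸ he)))
        · exact Or.inl (Or.inr (by rw [he, hu]))
        · exact Or.inr ⟨u, hu, hn, Or.inl he⟩
        · exact Or.inr ⟨u, hu, hn, Or.inr he⟩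

lemma row_eq (null : List (Int × Int)) (ci ti : List (List (Int × Int))) :
    (List.range ci.length).map (fun j =>
      let c := ci.getD j []
      let isExist := ti.foldl (fun b t => if is_equal_tuple_pair c t null then true else b) false
      if isExist then (1 : Int) else 0) =
    (if ci.isEmpty then ([] : List Int)
     else
       let keys := ti.foldl
         (fun s t => if t != null then PySem.Set.add (PySem.Set.add s t) t.dropLast else s)
         PySem.Set.empty
       ci.map (fun c => if PySem.Set.contains keys c then (1 : Int) else 0)) := by
  by_cases hci : ci = []
  · simp [hci]
  · rw [if_neg (by simpa using hci)]
    apply List.ext_getElem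
    · simp
    · intro j hj hj'
      have hjlen : j < ci.length := by simpa using hj
      rw [List.getElem_map, List.getElem_map, List.getElem_range]
      simp only [List.getD_eq_getElem ci [] hjlen, foldl_flag]
      set F := ti.foldl (fun s t => if t != null then PySem.Set.add (PySem.Set.add s t) t.dropLast else s) PySem.Set.empty with hF
      have hmem : PySem.Set.contains F (ci[j]'hjlen) = ti.any (fun t => is_equal_tuple_pair (ci[j]'hjlen) t null) := by
        by_cases h : (ci[j]'hjlen) ∈ F
        · rw [(PySem.Set.contains_iff F _).mpr h]
          rcases (mem_keysFold null ti PySem.Set.empty _).mp h with hs | ⟨t, ht, hn, he⟩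
          · simp [PySem.Set.empty] at hs
          · symm
            rw [List.any_eq_true]
            refine ⟨t, ht, ?_⟩
            rw [eqPair_eq]
            simp only [Bool.and_eq_true, Bool.not_eq_true', beq_eq_false_iff_ne, Bool.or_eq_true,
              beq_iff_eq]
            exact ⟨hn, he⟩
        · have hc : PySem.Set.contains F (ci[j]'hjlen) = false := by
            cases hcc : PySem.Set.contains F (ci[j]'hjlen) with
            | true => exact absurd ((PySem.Set.contains_iff F _).mp hcc) h
            | false => rfl
          rw [hc]
          symm
          rw [Bool.eq_false_iff]
          intro hany
          rcases List.any_eq_true.mp hany with ⟨t, ht, hp⟩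
          rw [eqPair_eq] at hp
          simp only [Bool.and_eq_true, Bool.not_eq_true', beq_eq_false_iff_ne, Bool.or_eq_true,
            beq_iff_eq] at hp
          exact h ((mem_keysFold null ti PySem.Set.empty _).mpr (Or.inr ⟨t, ht, hp.1, hp.2⟩))
      rw [hF] at hmem
      simp only [hmem, Bool.false_or]

-- ===== VERDICT (by name: the statement is the Claim_ definition above) =====
theorem create_pair_label_spec : Claim_equal_create_pair_label := by
  intro cand truth _ _
  unfold Spec_create_pair_label create_pair_label create_pair_label_alt
  apply List.ext_getElem
  · simp [PySem.List.length_enumerate]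
  · intro i hi hi'
    have hilen : i < cand.length := by simpa using hi
    rw [List.getElem_map, List.getElem_map, List.getElem_range, PySem.List.getElem_enumerate]
    simp only [zero_add]
    have hpg : PySem.List.pyGetD truth (i : Int) ([] : List (List (Int × Int))) = truth.getD i [] :=
      PySem.List.pyGetD_natCast truth i []
    rw [hpg]
    simp only [List.getD_eq_getElem cand [] hilen]
    exact row_eq _ (cand[i]'hilen) (truth.getD i [])
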